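-- pv_equiv track=rewrite | github.com/Boucanier/Convert-schedule-to-pdf | src/elementSchedule.py | clearElement
-- ===== SOURCE A (Python) =====
-- def clearElement(elementList : list[str]) -> list[str] :
--     """
--         Check if many elements are assigned to a same course and add them to the main element list if they are not already in it
--
--         - Args :
--             - elementList (list[str])
--
--         - Returns :
--             - elementList (list[str])
--     """
--     toRemove = []
--     toAdd = []
--     for i in range(len(elementList)):
--         if ',' in elementList[i] :
--             toRemove.append(elementList[i])
--             tempElementList = elementList[i].split(', ')
--             [toAdd.append(e) for e in tempElementList]
--     for e in toAdd :
--         if e not in elementList :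
--             elementList.append(e)
--     for e in toRemove :
--         elementList.remove(e)
--
--     return elementList
-- ===== SOURCE B (Python) =====
-- def clearElement(elementList):
--     # One classifying pass: comma entries are never copied into `kept` (no removal
--     # phase); their ', '-parts are queued in `additions` unless already seen
--     # (originals or earlier additions). Mutates elementList in place like A and
--     # returns the same object.
--     seen = set(elementList)
--     kept = []
--     additions = []
--     for s in elementList:
--         if ',' in s:
--             for part in s.split(', '):
--                 if part not in seen:
--                     seen.add(part)
--                     additions.append(part)
--         else:
--             kept.append(s)
--     elementList[:] = kept + additions
--     return elementList
-- ===== Notes on version B (the rewrite author's own statement) =====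
-- stated objective: simpler
-- what changed: Single classifying pass with a seen-set replaces A's three phases (collect toRemove/toAdd, append-with-linear-membership, then list.remove removal): comma entries are never copied so no removal phase exists, and dedup is an O(1) set lookup instead of scans of the growing list.
import Mathlib
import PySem

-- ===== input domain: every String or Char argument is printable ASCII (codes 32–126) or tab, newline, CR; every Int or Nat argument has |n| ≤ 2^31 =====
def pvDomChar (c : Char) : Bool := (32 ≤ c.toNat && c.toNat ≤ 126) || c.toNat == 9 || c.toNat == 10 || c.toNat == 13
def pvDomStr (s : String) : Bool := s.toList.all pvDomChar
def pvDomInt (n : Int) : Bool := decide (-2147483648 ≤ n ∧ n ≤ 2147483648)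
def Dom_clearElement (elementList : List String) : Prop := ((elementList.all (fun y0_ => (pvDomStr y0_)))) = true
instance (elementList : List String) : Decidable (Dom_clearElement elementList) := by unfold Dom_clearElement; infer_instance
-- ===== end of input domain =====

-- B replaces A's three phases (collect/append/remove) with one classifying pass and a
-- seen-set; equivalence is about the RETURN value (the Python A and B both also mutate
-- the argument list in place, to the same final contents).

-- shared primitive wrappers: ',' in s  and  s.split(', ')
def pvHasComma (s : String) : Bool := PySem.Str.isIn "," s
-- split? is none only for sep = ""; here sep = ", " so getD is a totality guard, exact
def pvSplit (s : String) : List String := (PySem.Str.split? s ", ").getD []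

-- ===== PORT A =====
-- first loop: for i in range(len(elementList)): if ',' in elementList[i] → toRemove/toAdd
def clearElementScan (elementList : List String) : List String × List String :=
  elementList.foldl
    (fun acc s =>
      if pvHasComma s then (acc.1 ++ [s], acc.2 ++ pvSplit s)
      else acc)
    ([], [])

def clearElement (elementList : List String) : List String :=
  let tr := clearElementScan elementList
  -- for e in toAdd: if e not in elementList: elementList.append(e)
  let lst := tr.2.foldl (fun lst e => if lst.contains e then lst else lst ++ [e]) elementList
  -- for e in toRemove: elementList.remove(e)  (remove? never fails here; getD is a totality guard)
  tr.1.foldl (fun lst e => (PySem.List.remove? lst e).getD lst) lst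

-- ===== PORT B =====
-- inner loop: for part in s.split(', '): if part not in seen: seen.add(part); additions.append(part)
def clearElementAddParts (st : PySem.Set String × List String) (s : String) :
    PySem.Set String × List String :=
  (pvSplit s).foldl
    (fun st2 part =>
      if PySem.Set.contains st2.1 part then st2
      else (PySem.Set.add st2.1 part, st2.2 ++ [part]))
    st

def clearElement_alt (elementList : List String) : List String :=
  let fin := elementList.foldl
    (fun (st : PySem.Set String × List String × List String) s =>
      if pvHasComma s then
        let sa := clearElementAddParts (st.1, st.2.2) s
        (sa.1, st.2.1, sa.2)
      else (st.1, st.2.1 ++ [s], st.2.2))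
    (PySem.Set.ofList elementList, [], [])
  fin.2.1 ++ fin.2.2

-- ===== PRECONDITION & SPEC =====
def Spec_clearElement (elementList : List String) (out : List String) : Prop := out = clearElement_alt elementList
instance (elementList : List String) (out : List String) : Decidable (Spec_clearElement elementList out) := by unfold Spec_clearElement; infer_instance

-- ===== CLAIM (what is proved, stated in full; the proofs are below) =====
def Claim_equal_clearElement : Prop := ∀ (elementList : List String), Dom_clearElement elementList → Spec_clearElement elementList (clearElement elementList)

-- ===== LEMMAS AND PROOFS =====

-- Phase 1 of A: the scan computes (filter, flatMap) of the comma elements.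
theorem scan_eq (l : List String) (r a : List String) :
    l.foldl (fun acc s => if pvHasComma s then
        (acc.1 ++ [s], acc.2 ++ pvSplit s) else acc) (r, a)
    = (r ++ l.filter pvHasComma, a ++ (l.filter pvHasComma).flatMap pvSplit) := by
  induction l generalizing r a with
  | nil => simp
  | cons x l ih =>
    rw [List.foldl_cons]
    by_cases h : pvHasComma x = true
    · rw [if_pos h, ih, List.filter_cons_of_pos h]
      simp [List.append_assoc]
    · rw [if_neg h, ih, List.filter_cons_of_neg h]

-- Phase 2 of A appends only elements not already present.
theorem addFold_new (parts lst : List String) :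
    ∃ t, parts.foldl (fun lst e => if lst.contains e then lst else lst ++ [e]) lst = lst ++ t
      ∧ ∀ x ∈ t, x ∉ lst := by
  induction parts generalizing lst with
  | nil => exact ⟨[], by simp⟩
  | cons e parts ih =>
    rw [List.foldl_cons]
    by_cases h : lst.contains e = true
    · obtain ⟨t, ht, hn⟩ := ih lst
      rw [if_pos h]
      exact ⟨t, ht, hn⟩
    · obtain ⟨t, ht, hn⟩ := ih (lst ++ [e])
      rw [if_neg h]
      refine ⟨e :: t, by rw [ht]; simp, ?_⟩
      intro x hx hxl
      rcases List.mem_cons.mp hx with rfl | hx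
      · rw [List.contains_eq_mem] at h; simp at h; exact h hxl
      · exact hn x hx (by simp [hxl])

-- Removing values distinct from the head commutes with cons.
theorem remFold_cons (r : List String) (x : String) (lst : List String)
    (h : ∀ v ∈ r, v ≠ x) :
    r.foldl (fun lst e => (PySem.List.remove? lst e).getD lst) (x :: lst)
    = x :: r.foldl (fun lst e => (PySem.List.remove? lst e).getD lst) lst := by
  induction r generalizing lst with
  | nil => simp
  | cons v r ih =>
    have hvx : x ≠ v := fun hh => (h v (by simp)) hh.symm
    simp only [List.foldl_cons]
    rw [PySem.List.remove?_cons_of_ne _ hvx]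
    cases hr : PySem.List.remove? lst v with
    | none => simp only [Option.map_none, Option.getD_none]
              exact ih _ (fun w hw => h w (by simp [hw]))
    | some res => simp only [Option.map_some, Option.getD_some]
                  exact ih _ (fun w hw => h w (by simp [hw]))

-- Phase 3 of A: removing each comma element of l from l ++ t leaves filter (!pvHasComma) l ++ t.
theorem remFold_eq (l t : List String) (ht : ∀ x ∈ t, x ∉ l) :
    (l.filter pvHasComma).foldl (fun lst e => (PySem.List.remove? lst e).getD lst) (l ++ t)
    = l.filter (fun s => !pvHasComma s) ++ t := by
  induction l with
  | nil => simp
  | cons x l ih =>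
    have ht' : ∀ y ∈ t, y ∉ l := fun y hy => fun hyl => ht y hy (by simp [hyl])
    by_cases h : pvHasComma x = true
    · rw [List.filter_cons_of_pos h, List.filter_cons_of_neg (by simp [h]),
        List.cons_append, List.foldl_cons, PySem.List.remove?_cons_self, Option.getD_some]
      exact ih ht'
    · have hne : ∀ v ∈ l.filter pvHasComma, v ≠ x := by
        intro v hv hvx
        have h2 : pvHasComma v = true := (List.mem_filter.mp hv).2
        rw [hvx] at h2; exact h h2
      rw [List.filter_cons_of_neg h,
        List.filter_cons_of_pos (by simp [Bool.not_eq_true] at h ⊢; exact h),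
        List.cons_append, remFold_cons _ _ _ hne, ih ht', List.cons_append]

-- Core correspondence: A's append-fold over `parts` starting from l ++ adds tracks
-- B's (seen, additions) fold starting from (ofList l ++ adds, adds).
theorem core (parts l adds : List String) :
    parts.foldl (fun lst e => if lst.contains e then lst else lst ++ [e]) (l ++ adds)
      = l ++ (parts.foldl
          (fun st2 part => if PySem.Set.contains st2.1 part then st2
            else (PySem.Set.add st2.1 part, st2.2 ++ [part]))
          ((PySem.Set.ofList l ++ adds : List String), adds)).2 := by
  induction parts generalizing adds with
  | nil => simp
  | cons e parts ih =>
    have hmem : ((l ++ adds).contains e)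
        = (PySem.Set.contains ((PySem.Set.ofList l ++ adds : List String)) e) := by
      simp only [PySem.Set.contains_eq_listContains, List.contains_eq_mem]
      by_cases h : e ∈ l
      · simp [h, PySem.Set.mem_ofList]
      · simp [h, PySem.Set.mem_ofList]
    rw [List.foldl_cons, List.foldl_cons]
    by_cases h : (l ++ adds).contains e = true
    · rw [if_pos h, if_pos (hmem ▸ h)]
      exact ih adds
    · have h' := hmem ▸ h
      rw [if_neg h, if_neg h']
      have hne : e ∉ ((PySem.Set.ofList l ++ adds : List String) : PySem.Set String) := by
        intro hc
        exact h' (by simpa [PySem.Set.contains_eq_listContains, List.contains_eq_mem] using hc)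
      rw [PySem.Set.add_of_not_mem hne]
      have h2 : (PySem.Set.ofList l ++ adds : List String) ++ [e]
          = (PySem.Set.ofList l ++ (adds ++ [e]) : List String) := by
        simp [List.append_assoc]
      rw [List.append_assoc]
      have := ih (adds ++ [e])
      rw [h2]
      exact this

-- B's outer fold: kept collects filter (!pvHasComma); (seen, additions) runs the inner
-- step over the concatenated parts of the comma elements.
theorem altFold_eq (l : List String) (seen : PySem.Set String) (kept adds : List String) :
    l.foldl
      (fun (st : PySem.Set String × List String × List String) s =>
        if pvHasComma s then
          let sa := clearElementAddParts (st.1, st.2.2) s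
          (sa.1, st.2.1, sa.2)
        else (st.1, st.2.1 ++ [s], st.2.2))
      (seen, kept, adds)
    = (let r := ((l.filter pvHasComma).flatMap pvSplit).foldl
          (fun st2 part => if PySem.Set.contains st2.1 part then st2
            else (PySem.Set.add st2.1 part, st2.2 ++ [part]))
          (seen, adds)
       (r.1, kept ++ l.filter (fun s => !pvHasComma s), r.2)) := by
  induction l generalizing seen kept adds with
  | nil => simp
  | cons x l ih =>
    rw [List.foldl_cons]
    by_cases h : pvHasComma x = true
    · rw [if_pos h]
      show (l.foldl _ (clearElementAddParts (seen, adds) x |>.1, kept,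
        clearElementAddParts (seen, adds) x |>.2)) = _
      rw [ih]
      rw [List.filter_cons_of_pos h, List.filter_cons_of_neg (by simp [h])]
      simp only [clearElementAddParts, List.flatMap_cons, List.foldl_append]
    · rw [if_neg h, ih, List.filter_cons_of_neg h,
        List.filter_cons_of_pos (by simp [Bool.not_eq_true] at h ⊢; exact h)]
      simp [List.append_assoc]

-- ===== VERDICT (by name: the statement is the Claim_ definition above) =====
theorem clearElement_spec : Claim_equal_clearElement := by
  intro l _
  unfold Spec_clearElement clearElement clearElement_alt clearElementScan
  rw [scan_eq l [] []]
  simp only [List.nil_append]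
  rw [altFold_eq]
  have hcore := core ((l.filter pvHasComma).flatMap pvSplit) l []
  simp only [List.append_nil] at hcore
  obtain ⟨t, ht, htn⟩ := addFold_new ((l.filter pvHasComma).flatMap pvSplit) l
  have hteq : t = (((l.filter pvHasComma).flatMap pvSplit).foldl
      (fun st2 part => if PySem.Set.contains st2.1 part then st2
        else (PySem.Set.add st2.1 part, st2.2 ++ [part]))
      ((PySem.Set.ofList l : List String), [])).2 := by
    exact List.append_cancel_left (ht ▸ hcore)
  rw [ht, remFold_eq l t htn, hteq]
  simp
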